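-- pv_equiv track=rewrite | github.com/dmmil/rnn22 | Support/words_support.py | convert_words_to_ssps
-- ===== SOURCE A (Python) =====
-- def convert_words_to_ssps(dictionary, words):
--     #words_splitted = words.split('\n')
--
--     lst = words.split('\n')
--     words_splitted = []
--     for entry in lst:
--         if entry.strip() != '':
--             words_splitted.append(entry)
--
--     ssp = ''
--     for i in range(len(dictionary)):
--         if dictionary[i] in words_splitted:
--             ssp += '1'
--         else:
--             ssp += '0'
--     return ssp
-- ===== SOURCE B (Python) =====
-- def convert_words_to_ssps(dictionary, words):
--     # Inverted index: dictionary word -> all positions where it occurs.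
--     index = {}
--     for i, w in enumerate(dictionary):
--         index.setdefault(w, []).append(i)
--     bits = ['0'] * len(dictionary)
--     for entry in words.split('\n'):
--         if entry.strip() != '':
--             for i in index.get(entry, []):
--                 bits[i] = '1'
--     return ''.join(bits)
-- ===== Notes on version B (the rewrite author's own statement) =====
-- stated objective: alternative
-- what changed: Replaces the per-dictionary-slot membership scan over the filtered word list with an inverted index (word -> positions) built once, then a single pass over the words setting bits in a preallocated list.
import Mathlib
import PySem

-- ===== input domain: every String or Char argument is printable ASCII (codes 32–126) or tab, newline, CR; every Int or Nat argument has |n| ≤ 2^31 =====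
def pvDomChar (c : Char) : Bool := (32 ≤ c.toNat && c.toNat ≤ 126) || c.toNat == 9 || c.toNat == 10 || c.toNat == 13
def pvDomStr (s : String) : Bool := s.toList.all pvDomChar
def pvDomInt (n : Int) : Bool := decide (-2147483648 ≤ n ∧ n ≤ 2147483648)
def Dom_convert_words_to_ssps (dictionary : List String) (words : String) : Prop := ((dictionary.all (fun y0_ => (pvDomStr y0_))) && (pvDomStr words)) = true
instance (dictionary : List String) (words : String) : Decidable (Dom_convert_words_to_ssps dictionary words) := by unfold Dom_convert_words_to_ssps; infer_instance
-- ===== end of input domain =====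

-- B replaces A's per-slot membership scan with an inverted index (word -> positions) and one pass over the words.
-- shared trivial helper: words.split('\n') (sep "\n" is nonempty, so split? always returns some)
def pySplitNL (words : String) : List String := (PySem.Str.split? words "\n").getD []

-- ===== PORT A =====
def convert_words_to_ssps (dictionary : List String) (words : String) : String :=
  let lst : List String := pySplitNL words
  let words_splitted : List String := lst.foldl
    (fun acc entry => if PySem.Str.strip entry ≠ "" then acc ++ [entry] else acc) []
  (PySem.List.pyRange 0 (dictionary.length : Int) 1).foldl
    (fun ssp i =>
      if words_splitted.contains (PySem.List.pyGetD dictionary i "") then ssp ++ "1" else ssp ++ "0")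
    ""

-- ===== PORT B =====
def convert_words_to_ssps_alt (dictionary : List String) (words : String) : String :=
  let index : PySem.Dict String (List Int) :=
    (PySem.List.enumerate dictionary 0).foldl
      (fun d p => d.modify p.2 [] (fun l => l ++ [p.1])) PySem.Dict.empty
  let bits : List Char :=
    (pySplitNL words).foldl
      (fun bits entry =>
        if PySem.Str.strip entry ≠ "" then
          (index.getD entry []).foldl (fun b i => PySem.List.pySetD b i '1') bits
        else bits)
      (List.replicate dictionary.length '0')
  String.ofList bits

-- ===== PRECONDITION & SPEC =====
def Spec_convert_words_to_ssps (dictionary : List String) (words : String) (out : String) : Prop := out = convert_words_to_ssps_alt dictionary words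
instance (dictionary : List String) (words : String) (out : String) : Decidable (Spec_convert_words_to_ssps dictionary words out) := by unfold Spec_convert_words_to_ssps; infer_instance

-- ===== CLAIM (what is proved, stated in full; the proofs are below) =====
def Claim_equal_convert_words_to_ssps : Prop := ∀ (dictionary : List String) (words : String), Dom_convert_words_to_ssps dictionary words → Spec_convert_words_to_ssps dictionary words (convert_words_to_ssps dictionary words)

-- ===== LEMMAS AND PROOFS =====

-- the inverted index B builds (proof-side name for the foldl in the port)
def pvIdx (dictionary : List String) : PySem.Dict String (List Int) :=
  (PySem.List.enumerate dictionary 0).foldl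
    (fun d p => d.modify p.2 [] (fun l => l ++ [p.1])) PySem.Dict.empty

theorem pvIdx_getD (dictionary : List String) (w : String) :
    (pvIdx dictionary).getD w []
      = ((PySem.List.enumerate dictionary 0).filter (fun p => p.2 == w)).map (fun p => p.1) := by
  unfold pvIdx
  have hswap : (PySem.List.enumerate dictionary 0).foldl
        (fun d p => d.modify p.2 [] (fun l => l ++ [p.1])) PySem.Dict.empty
      = ((PySem.List.enumerate dictionary 0).map Prod.swap).foldl
        (fun d q => d.modify q.1 [] (fun l => l ++ [q.2])) PySem.Dict.empty := by
    rw [List.foldl_map]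
    simp
  rw [hswap, PySem.Dict.getD_foldl_modify_append]
  simp [List.filter_map, List.map_map, Function.comp_def]

theorem pvIdx_mem (dictionary : List String) (w : String) (i : Int) :
    i ∈ (pvIdx dictionary).getD w []
      ↔ ∃ k : Nat, ∃ _ : k < dictionary.length, i = (k : Int) ∧ dictionary.getD k "" = w := by
  rw [pvIdx_getD]
  simp only [List.mem_map, List.mem_filter, PySem.List.mem_enumerate_iff]
  constructor
  · rintro ⟨p, ⟨⟨k, hk, rfl⟩, hw⟩, rfl⟩
    refine ⟨k, hk, by simp, ?_⟩
    simp only [beq_iff_eq] at hw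
    simp [List.getD_eq_getElem?_getD, List.getElem?_eq_getElem hk, hw]
  · rintro ⟨k, hk, rfl, hw⟩
    refine ⟨((k : Int), dictionary[k]), ⟨⟨k, hk, by simp⟩, ?_⟩, rfl⟩
    simp only [beq_iff_eq]
    simpa [List.getD_eq_getElem?_getD, List.getElem?_eq_getElem hk] using hw

theorem pvIdx_nonneg (dictionary : List String) (w : String) (i : Int)
    (h : i ∈ (pvIdx dictionary).getD w []) : 0 ≤ i := by
  rcases (pvIdx_mem dictionary w i).mp h with ⟨k, _, rfl, _⟩
  exact Int.natCast_nonneg k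

theorem pvSetFold_len (idxs : List Int) (bits : List Char) :
    (idxs.foldl (fun b i => PySem.List.pySetD b i '1') bits).length = bits.length := by
  induction idxs generalizing bits with
  | nil => rfl
  | cons i t ih => simp [List.foldl_cons, ih, PySem.List.length_pySetD]

theorem pvSetFold_getElem? (idxs : List Int) (bits : List Char)
    (h : ∀ i ∈ idxs, 0 ≤ i) (k : Nat) :
    (idxs.foldl (fun b i => PySem.List.pySetD b i '1') bits)[k]?
      = if (k : Int) ∈ idxs ∧ k < bits.length then some '1' else bits[k]? := by
  induction idxs generalizing bits with
  | nil => simp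
  | cons i t ih =>
    have h0 : 0 ≤ i := h i (List.mem_cons_self ..)
    rw [List.foldl_cons, PySem.List.pySetD_of_nonneg _ _ h0,
      ih _ (fun j hj => h j (List.mem_cons_of_mem _ hj))]
    have hik : i = (k : Int) ↔ i.toNat = k := by omega
    simp only [List.length_set, List.getElem?_set, List.mem_cons]
    by_cases h1 : (k : Int) ∈ t <;> by_cases h2 : k < bits.length <;>
      by_cases h3 : i.toNat = k <;>
      simp [h1, h2, h3] <;> omega

theorem pvOuterFold_getElem? (g : String → List Int)
    (hg : ∀ e, ∀ i ∈ g e, 0 ≤ i) (entries : List String) (bits : List Char) (k : Nat) :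
    (entries.foldl
        (fun bits entry =>
          if PySem.Str.strip entry ≠ "" then
            (g entry).foldl (fun b i => PySem.List.pySetD b i '1') bits
          else bits) bits)[k]?
      = if ∃ e ∈ entries, PySem.Str.strip e ≠ "" ∧ (k : Int) ∈ g e ∧ k < bits.length
        then some '1' else bits[k]? := by
  induction entries generalizing bits with
  | nil => simp
  | cons e t ih =>
    rw [List.foldl_cons]
    by_cases he : PySem.Str.strip e ≠ ""
    · rw [if_pos he, ih, pvSetFold_len, pvSetFold_getElem? _ _ (hg e)]
      simp only [List.exists_mem_cons_iff]
      by_cases h1 : ∃ x ∈ t, PySem.Str.strip x ≠ "" ∧ (k : Int) ∈ g x ∧ k < bits.length <;>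
        by_cases h2 : (k : Int) ∈ g e ∧ k < bits.length <;>
        simp [h1, h2, he]
    · rw [if_neg he, ih]
      simp only [List.exists_mem_cons_iff]
      have hne : ¬ (PySem.Str.strip e ≠ "" ∧ (k : Int) ∈ g e ∧ k < bits.length) := by
        intro h
        exact he h.1
      simp [hne]

theorem pvStrFold (p : String → Bool) (l : List String) (s : String) :
    (l.foldl (fun ssp x => if p x then ssp ++ "1" else ssp ++ "0") s).toList
      = s.toList ++ l.map (fun x => if p x then '1' else '0') := by
  induction l generalizing s with
  | nil => simp
  | cons x t ih => by_cases hx : p x <;> simp [hx, ih, String.toList_append]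


-- ===== VERDICT (by name: the statement is the Claim_ definition above) =====
theorem convert_words_to_ssps_spec : Claim_equal_convert_words_to_ssps := by
  intro dictionary words _
  show convert_words_to_ssps dictionary words = convert_words_to_ssps_alt dictionary words
  rw [← String.toList_inj]
  have hA : (convert_words_to_ssps dictionary words).toList
      = dictionary.map (fun x =>
          if ((pySplitNL words).filter (fun e => decide (PySem.Str.strip e ≠ ""))).contains x
          then '1' else '0') := by
    unfold convert_words_to_ssps
    simp only [PySem.List.foldl_append_ite_eq_filter, List.nil_append]
    rw [PySem.List.foldl_pyRange_zero_pyGetD' dictionary ""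
        (fun ssp x => if ((pySplitNL words).filter (fun e => decide (PySem.Str.strip e ≠ ""))).contains x
          then ssp ++ "1" else ssp ++ "0") "",
      pvStrFold]
    simp
  have hB : (convert_words_to_ssps_alt dictionary words).toList
      = dictionary.map (fun x =>
          if ((pySplitNL words).filter (fun e => decide (PySem.Str.strip e ≠ ""))).contains x
          then '1' else '0') := by
    unfold convert_words_to_ssps_alt
    rw [show ((PySem.List.enumerate dictionary 0).foldl
        (fun d p => d.modify p.2 [] (fun l => l ++ [p.1])) PySem.Dict.empty) = pvIdx dictionary from rfl]
    rw [String.toList_ofList]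
    apply List.ext_getElem?
    intro k
    rw [pvOuterFold_getElem? (fun e => (pvIdx dictionary).getD e []) (fun e => pvIdx_nonneg dictionary e)]
    simp only [List.length_replicate, List.getElem?_replicate, List.getElem?_map]
    by_cases hk : k < dictionary.length
    · have hcond : (∃ e ∈ pySplitNL words, PySem.Str.strip e ≠ ""
            ∧ (k : Int) ∈ (pvIdx dictionary).getD e [] ∧ k < dictionary.length)
          ↔ ((pySplitNL words).filter (fun e => decide (PySem.Str.strip e ≠ ""))).contains
              (dictionary[k]) := by
        simp only [pvIdx_mem, List.contains_iff_mem, List.mem_filter, decide_eq_true_iff]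
        constructor
        · rintro ⟨e, he, hs, ⟨j, hj, hjk, hw⟩, -⟩
          have : j = k := by omega
          subst this
          have : dictionary[j] = e := by simpa [List.getD_eq_getElem?_getD, hj] using hw
          exact this ▸ ⟨he, hs⟩
        · rintro ⟨he, hs⟩
          exact ⟨dictionary[k], he, hs,
            ⟨k, hk, rfl, by simp [List.getD_eq_getElem?_getD, hk]⟩, hk⟩
      rw [List.getElem?_eq_getElem hk]
      simp only [Option.map_some]
      by_cases hc : ((pySplitNL words).filter (fun e => decide (PySem.Str.strip e ≠ ""))).contains
          (dictionary[k]) = true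
      · rw [if_pos (hcond.mpr hc), if_pos hc]
      · rw [if_neg (fun h => hc (hcond.mp h)), if_pos hk, if_neg hc]
    · rw [if_neg (by rintro ⟨e, he, hs, hm, hlt⟩; exact hk hlt), if_neg hk,
        List.getElem?_eq_none (by simpa using hk)]
      rfl
  rw [hA, hB]
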